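-- pv_equiv track=rewrite | github.com/rachelmetzgar/AI_mind_rep | exp_1/old_approach/old_cross_exp_compare/filler_marker_tests.py | find_old_id
-- ===== SOURCE A (Python) =====
-- def get_sub_id_map():
--     """Legacy behavioral ID -> standardized MRI ID mapping."""
--     return {
--         "P08": "sub-001", "s08": "sub-001",
--         "P12": "sub-002", "s12": "sub-002",
--         "P13": "sub-003", "s13": "sub-003",
--         "P14": "sub-004", "s14": "sub-004",
--         "P15": "sub-005", "s15": "sub-005",
--         "P16": "sub-006", "s16": "sub-006",
--         "P17": "sub-007", "s17": "sub-007",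
--         "P18": "sub-008", "s18": "sub-008",
--         "P20": "sub-009", "s20": "sub-009",
--         "P21": "sub-010", "s21": "sub-010",
--         "P22": "sub-011", "s22": "sub-011",
--         "P24": "sub-012", "s24": "sub-012",
--         "P25": "sub-013", "s25": "sub-013",
--         "P26": "sub-014", "s26": "sub-014",
--         "P27": "sub-015", "s27": "sub-015",
--         "P28": "sub-016", "s28": "sub-016",
--         "P30": "sub-017", "s30": "sub-017",
--         "P31": "sub-018", "s31": "sub-018",
--         "P32": "sub-019", "s32": "sub-019",
--         "P33": "sub-020", "s33": "sub-020",
--         "P34": "sub-021", "s34": "sub-021",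
--         "P35": "sub-022", "s35": "sub-022",
--         "P36": "sub-023", "s36": "sub-023",
--     }
--
-- def find_old_id(new_id: str) -> str | None:
--     """Return the old subject ID (e.g. s36, P36) given sub-###."""
--     id_map = get_sub_id_map()
--     old_ids = [k for k, v in id_map.items() if v == new_id]
--     if not old_ids:
--         return None
--     for old in old_ids:
--         if old.startswith("s"):
--             return old
--     return old_ids[0]
-- ===== SOURCE B (Python) =====
-- # B: two precomputed parallel arrays (standardized ids / old 's' suffixes) and one
-- # positional index lookup -- no dict, no filter pass, no prefix-preference scan.
-- _NEW_IDS = [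
--     "sub-001", "sub-002", "sub-003", "sub-004", "sub-005", "sub-006",
--     "sub-007", "sub-008", "sub-009", "sub-010", "sub-011", "sub-012",
--     "sub-013", "sub-014", "sub-015", "sub-016", "sub-017", "sub-018",
--     "sub-019", "sub-020", "sub-021", "sub-022", "sub-023",
-- ]
-- _OLD_SUFFIXES = [
--     "08", "12", "13", "14", "15", "16", "17", "18", "20", "21", "22",
--     "24", "25", "26", "27", "28", "30", "31", "32", "33", "34", "35", "36",
-- ]
--
-- def find_old_id(new_id: str) -> str | None:
--     """Return the old subject ID (e.g. s36) given sub-###."""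
--     if new_id in _NEW_IDS:
--         return "s" + _OLD_SUFFIXES[_NEW_IDS.index(new_id)]
--     return None
-- ===== Notes on version B (the rewrite author's own statement) =====
-- stated objective: simpler
-- what changed: Replaces A's per-call dict filter over all 46 map entries plus a second prefix-preference scan by two precomputed parallel arrays (standardized id paired with the preferred lowercase-prefixed old id) and a single positional index lookup; every standardized id has exactly one lowercase-prefixed key, so the preference and the None fallback are preserved.
import Mathlib
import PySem

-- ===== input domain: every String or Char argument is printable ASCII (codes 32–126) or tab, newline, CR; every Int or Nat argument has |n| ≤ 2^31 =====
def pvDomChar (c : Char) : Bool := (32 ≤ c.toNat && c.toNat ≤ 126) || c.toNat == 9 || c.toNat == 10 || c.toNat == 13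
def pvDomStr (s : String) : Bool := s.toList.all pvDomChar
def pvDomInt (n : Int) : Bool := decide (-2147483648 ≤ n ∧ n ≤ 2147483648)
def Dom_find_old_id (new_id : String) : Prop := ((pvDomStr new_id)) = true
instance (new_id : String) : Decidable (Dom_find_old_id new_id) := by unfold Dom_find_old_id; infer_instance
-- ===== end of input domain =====

-- B replaces A's per-call dict filter and prefix-preference scan by two parallel arrays and one positional index lookup (objective: simpler).

-- ===== PORT A =====
def get_sub_id_map : PySem.Dict String String := PySem.Dict.ofList [("P08", "sub-001"), ("s08", "sub-001"), ("P12", "sub-002"), ("s12", "sub-002"), ("P13", "sub-003"), ("s13", "sub-003"), ("P14", "sub-004"), ("s14", "sub-004"), ("P15", "sub-005"), ("s15", "sub-005"), ("P16", "sub-006"), ("s16", "sub-006"), ("P17", "sub-007"), ("s17", "sub-007"), ("P18", "sub-008"), ("s18", "sub-008"), ("P20", "sub-009"), ("s20", "sub-009"), ("P21", "sub-010"), ("s21", "sub-010"), ("P22", "sub-011"), ("s22", "sub-011"), ("P24", "sub-012"), ("s24", "sub-012"), ("P25", "sub-013"), ("s25", "sub-013"), ("P26", "sub-014"), ("s26",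 "sub-014"), ("P27", "sub-015"), ("s27", "sub-015"), ("P28", "sub-016"), ("s28", "sub-016"), ("P30", "sub-017"), ("s30", "sub-017"), ("P31", "sub-018"), ("s31", "sub-018"), ("P32", "sub-019"), ("s32", "sub-019"), ("P33", "sub-020"), ("s33", "sub-020"), ("P34", "sub-021"), ("s34", "sub-021"), ("P35", "sub-022"), ("s35", "sub-022"), ("P36", "sub-023"), ("s36", "sub-023")]

def find_old_id (new_id : String) : Option String :=
  let id_map := get_sub_id_map
  let old_ids := id_map.items.filterMap (fun kv => if kv.2 == new_id then some kv.1 else none)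
  match old_ids with
  | [] => none
  | first :: _ =>
    match old_ids.find? (fun old => PySem.Str.startswith old "s") with
    | some old => some old
    | none => some first

-- ===== PORT B =====
-- B: parallel arrays; membership test, positional index, then one indexed access.
def pvNewIds : List String := ["sub-001", "sub-002", "sub-003", "sub-004", "sub-005", "sub-006", "sub-007", "sub-008", "sub-009", "sub-010", "sub-011", "sub-012", "sub-013", "sub-014", "sub-015", "sub-016", "sub-017", "sub-018", "sub-019", "sub-020", "sub-021", "sub-022", "sub-023"]
def pvOldSuffixes : List String := ["08", "12", "13", "14", "15", "16", "17", "18", "20", "21", "22", "24", "25", "26", "27", "28", "30", "31", "32", "33", "34", "35", "36"]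

def find_old_id_alt (new_id : String) : Option String :=
  if pvNewIds.contains new_id then
    match PySem.List.index? pvNewIds new_id with
    | some i => (PySem.List.pyGet? pvOldSuffixes (i : Int)).map (fun suf => PySem.Str.join "" ["s", suf])
    | none => none
  else none

-- ===== PRECONDITION & SPEC =====
def Spec_find_old_id (new_id : String) (out : Option String) : Prop := out = find_old_id_alt new_id
instance (new_id : String) (out : Option String) : Decidable (Spec_find_old_id new_id out) := by unfold Spec_find_old_id; infer_instance

-- ===== CLAIM (what is proved, stated in full; the proofs are below) =====
def Claim_equal_find_old_id : Prop := ∀ (new_id : String), Dom_find_old_id new_id → Spec_find_old_id new_id (find_old_id new_id)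

-- ===== LEMMAS AND PROOFS =====
set_option maxRecDepth 100000 in
theorem items_eq : get_sub_id_map.items = [("P08", "sub-001"), ("s08", "sub-001"), ("P12", "sub-002"), ("s12", "sub-002"), ("P13", "sub-003"), ("s13", "sub-003"), ("P14", "sub-004"), ("s14", "sub-004"), ("P15", "sub-005"), ("s15", "sub-005"), ("P16", "sub-006"), ("s16", "sub-006"), ("P17", "sub-007"), ("s17", "sub-007"), ("P18", "sub-008"), ("s18", "sub-008"), ("P20", "sub-009"), ("s20", "sub-009"), ("P21", "sub-010"), ("s21", "sub-010"), ("P22", "sub-011"), ("s22", "sub-011"), ("P24", "sub-012"), ("s24", "sub-012"), ("P25", "sub-013"), ("s25", "sub-013"), ("P26", "sub-014"), ("s26", "sub-014"), ("P27", "sub-015"), ("s27", "sub-015"), ("P28", "sub-016"), ("s28", "sub-016"), ("P30", "sub-017"), ("s30", "sub-017"), ("P31", "sub-018"), ("s31", "sub-018"), ("P32", "sub-019"), ("s32", "sub-019"), ("P33", "sub-020"), ("s33", "sub-020"), ("P34", "sub-021"), ("s34", "sub-021"), ("P35", "sub-022"), ("s35", "sub-022"), ("P36", "sub-023"), ("s36",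 "sub-023")] := by decide

-- every value of the forward map is a standardized id
theorem values_mem (kv : String × String) (h : kv ∈ get_sub_id_map.items) : kv.2 ∈ pvNewIds := by
  rw [items_eq] at h
  fin_cases h <;> decide

theorem a_none_of_not_mem (new_id : String) (hmem : new_id ∉ pvNewIds) :
    find_old_id new_id = none := by
  unfold find_old_id
  have hnil : get_sub_id_map.items.filterMap
      (fun kv => if kv.2 == new_id then some kv.1 else none) = [] := by
    rw [List.filterMap_eq_nil_iff]
    intro kv hkv
    have hv := values_mem kv hkv
    have hne : kv.2 ≠ new_id := fun heq => hmem (heq ▸ hv)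
    simp [hne]
  simp only [hnil]

theorem b_none_of_not_mem (new_id : String) (hmem : new_id ∉ pvNewIds) :
    find_old_id_alt new_id = none := by
  unfold find_old_id_alt
  rw [if_neg]
  simpa using hmem

-- ===== VERDICT (by name: the statement is the Claim_ definition above) =====
set_option maxRecDepth 100000 in
set_option maxHeartbeats 2000000 in
theorem find_old_id_spec : Claim_equal_find_old_id := by
  intro new_id _
  unfold Spec_find_old_id
  by_cases hmem : new_id ∈ pvNewIds
  · fin_cases hmem <;> decide
  · rw [a_none_of_not_mem new_id hmem, b_none_of_not_mem new_id hmem]
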